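-- pv_equiv track=rewrite | github.com/lithorus/cgru | afanasy/python/afcommon.py | patternFromFile
-- ===== SOURCE A (Python) =====
-- Digits = '01234567890'
--
-- def patternFromFile(path):
--     """Return Afanasy pattern searching for digits before last "."
--
--     :param str path:
--     """
--     pos = path.rfind('.')
--     if pos < 1:
--         return path
--     pos_ext = pos
--     pos -= 1
--     while pos >= 0:
--         if not path[pos] in Digits:
--             break
--         pos -= 1
--     pos += 1
--     if pos == pos_ext:
--         return path
--
--     return path[:pos] + '@' + '#' * (pos_ext - pos) + '@' + path[pos_ext:]
-- ===== SOURCE B (Python) =====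
-- def patternFromFile(path):
--     """Return Afanasy pattern searching for digits before last "."
--
--     :param str path:
--     """
--     run = 0          # start of the digit run ending at the current position
--     mark = None      # (run start, index) recorded at the last '.' seen so far
--     for i, c in enumerate(path):
--         if c == '.':
--             mark = (run, i)
--             run = i + 1
--         elif c not in '0123456789':
--             run = i + 1
--     if mark is None:
--         return path
--     s, e = mark
--     if s == e:
--         return path
--     return path[:s] + '@' + '#' * (e - s) + '@' + path[e:]
-- ===== Notes on version B (the rewrite author's own statement) =====
-- stated objective: alternative
-- what changed: Replaces A's rfind for the last dot followed by a backward per-character digit scan with a single forward pass over enumerate(path) that maintains the start of the current digit run and records (run start, index) at each dot, the last dot winning.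
import Mathlib
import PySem

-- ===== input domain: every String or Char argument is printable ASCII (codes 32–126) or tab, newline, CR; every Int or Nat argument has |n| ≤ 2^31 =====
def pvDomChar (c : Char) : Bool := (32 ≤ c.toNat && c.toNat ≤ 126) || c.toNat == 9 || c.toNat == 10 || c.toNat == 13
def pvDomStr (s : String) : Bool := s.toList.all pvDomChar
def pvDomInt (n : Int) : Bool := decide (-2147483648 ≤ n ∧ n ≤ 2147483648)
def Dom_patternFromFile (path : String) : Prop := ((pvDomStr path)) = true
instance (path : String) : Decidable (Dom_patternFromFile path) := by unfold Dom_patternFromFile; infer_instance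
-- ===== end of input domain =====

set_option maxRecDepth 10000


-- B replaces A's rfind plus backward digit scan by a single forward pass over
-- enumerate(path) that maintains the current digit-run start and the mark at the
-- last dot seen (objective: alternative, same O(n) cost).

-- ===== PORT A =====
-- module constant Digits = '01234567890'
def pvDigitsA : List Char := "01234567890".toList

-- the 'while pos >= 0: if not path[pos] in Digits: break; pos -= 1' loop, returning the final pos;
-- the index pos is always in range here, so getD is an exact port of path[pos]
def pvAWhile (l : List Char) (n : Nat) : Int :=
  if List.elem (l.getD n ' ') pvDigitsA then
    match n with
    | 0 => -1
    | m + 1 => pvAWhile l m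
  else (n : Int)

def patternFromFile (path : String) : String :=
  let l := path.toList
  let pos₀ := PySem.Chars.rfind l ['.']
  if pos₀ < 1 then path
  else
    let posExt := pos₀
    let pos := pvAWhile l (pos₀ - 1).toNat + 1
    if pos = posExt then path
    else
      String.ofList (PySem.List.slice l none (some pos) ++ ['@']
        ++ List.replicate (posExt - pos).toNat '#' ++ ['@']
        ++ PySem.List.slice l (some posExt) none)

-- ===== PORT B =====
def pvDigitsB : List Char := "0123456789".toList

-- the loop body of B's forward pass: state (run, mark), item (i, c)
def pvBStep (st : Int × Option (Int × Int)) (ic : Int × Char) : Int × Option (Int × Int) :=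
  if ic.2 = '.' then (ic.1 + 1, some (st.1, ic.1))
  else if List.elem ic.2 pvDigitsB = false then (ic.1 + 1, st.2)
  else st

def patternFromFile_alt (path : String) : String :=
  let l := path.toList
  let st := (PySem.List.enumerate l 0).foldl pvBStep (0, none)
  match st.2 with
  | none => path
  | some (s, e) =>
    if s = e then path
    else
      String.ofList (PySem.List.slice l none (some s) ++ ['@']
        ++ List.replicate (e - s).toNat '#' ++ ['@']
        ++ PySem.List.slice l (some e) none)

-- ===== PRECONDITION & SPEC =====
def Spec_patternFromFile (path : String) (out : String) : Prop := out = patternFromFile_alt path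
instance (path : String) (out : String) : Decidable (Spec_patternFromFile path out) := by unfold Spec_patternFromFile; infer_instance

-- ===== CLAIM =====
def Claim_equal_patternFromFile : Prop := ∀ (path : String), Dom_patternFromFile path → Spec_patternFromFile path (patternFromFile path)

-- ===== LEMMAS AND PROOFS =====

-- length of the trailing digit run of p
def pvTdr (p : List Char) : Nat := (p.reverse.takeWhile (fun c => List.elem c pvDigitsB)).length

lemma pvDigits_agree (c : Char) : List.elem c pvDigitsA = List.elem c pvDigitsB := by
  have h1 : pvDigitsA = ['0','1','2','3','4','5','6','7','8','9','0'] := by decide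
  have h2 : pvDigitsB = ['0','1','2','3','4','5','6','7','8','9'] := by decide
  rw [h1, h2]
  simp only [List.elem_eq_mem, List.mem_cons, decide_eq_decide]
  tauto

lemma rfind_go_ge (s sub : List Char) (j : Nat) : -1 ≤ PySem.Chars.rfind.go s sub j := by
  induction j with
  | zero => rw [PySem.Chars.rfind.go.eq_def]; simp; split <;> simp
  | succ m ih =>
    rw [PySem.Chars.rfind.go.eq_def]; simp; split
    · omega
    · exact ih

lemma rfind_go_spec (s sub : List Char) (j : Nat) (h : 0 ≤ PySem.Chars.rfind.go s sub j) :
    sub <+: s.drop (PySem.Chars.rfind.go s sub j).toNat ∧ PySem.Chars.rfind.go s sub j ≤ j := by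
  induction j with
  | zero =>
    rw [PySem.Chars.rfind.go.eq_def] at h ⊢
    simp at h ⊢
    split at h
    · next hp => simp [hp]
    · omega
  | succ m ih =>
    rw [PySem.Chars.rfind.go.eq_def] at h ⊢
    simp at h ⊢
    split at h
    · next hp => simp [hp]
    · next hp =>
      have := ih h
      simp [hp]
      exact ⟨this.1, by omega⟩

lemma rfind_ge (s sub : List Char) : -1 ≤ PySem.Chars.rfind s sub := rfind_go_ge s sub s.length

lemma rfind_spec (s sub : List Char) (h : 0 ≤ PySem.Chars.rfind s sub) :
    sub <+: s.drop (PySem.Chars.rfind s sub).toNat ∧ PySem.Chars.rfind s sub ≤ s.length :=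
  rfind_go_spec s sub s.length h

lemma isPrefixOf_dot_eq (ys zs : List Char) (h : ys.head? = zs.head?) :
    List.isPrefixOf ['.'] ys = List.isPrefixOf ['.'] zs := by
  cases ys with
  | nil =>
    cases zs with
    | nil => rfl
    | cons z u => simp at h
  | cons y t =>
    cases zs with
    | nil => simp at h
    | cons z u =>
      simp only [List.head?_cons, Option.some.injEq] at h
      simp [List.isPrefixOf, h]

lemma go_dot_append (p : List Char) (c : Char) (j : Nat) (hj : j < p.length) :
    PySem.Chars.rfind.go (p ++ [c]) ['.'] j = PySem.Chars.rfind.go p ['.'] j := by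
  induction j with
  | zero =>
    rw [PySem.Chars.rfind.go.eq_def, PySem.Chars.rfind.go.eq_def]
    have hh : (p ++ [c]).head? = p.head? := by
      cases p
      · simp at hj
      · simp
    simp only [isPrefixOf_dot_eq _ _ hh]
  | succ m ih =>
    rw [PySem.Chars.rfind.go.eq_def, PySem.Chars.rfind.go.eq_def]
    have hh : ((p ++ [c]).drop (m+1)).head? = (p.drop (m+1)).head? := by
      rw [List.head?_drop, List.head?_drop, List.getElem?_append_left hj]
    simp only [isPrefixOf_dot_eq _ _ hh, ih (by omega)]

lemma rfind_dot_append (p : List Char) (c : Char) :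
    PySem.Chars.rfind (p ++ [c]) ['.'] = if c = '.' then (p.length : Int) else PySem.Chars.rfind p ['.'] := by
  cases p with
  | nil =>
    by_cases hc : c = '.'
    · subst hc; decide
    · unfold PySem.Chars.rfind
      rw [PySem.Chars.rfind.go.eq_def]
      simp only [List.nil_append, List.length_cons, List.length_nil]
      rw [PySem.Chars.rfind.go.eq_def, PySem.Chars.rfind.go.eq_def]
      simp only [List.isPrefixOf]
      simp [Ne.symm hc, hc]
  | cons y t =>
    unfold PySem.Chars.rfind
    have hlen : ((y :: t) ++ [c]).length = t.length + 1 + 1 := by simp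
    rw [hlen]
    rw [PySem.Chars.rfind.go.eq_def]
    have hnil : ((y :: t) ++ [c]).drop (t.length + 1 + 1) = [] := by
      apply List.drop_eq_nil_of_le; simp
    have hone : ((y :: t) ++ [c]).drop (t.length + 1) = [c] := by
      have : (y :: t).length = t.length + 1 := by simp
      rw [← this, List.drop_append_of_le_length (by simp)]
      simp
    simp only [hnil]
    rw [show List.isPrefixOf ['.'] ([] : List Char) = false from rfl]
    simp only [Bool.false_eq_true, if_false]
    rw [PySem.Chars.rfind.go.eq_def]
    simp only [hone]
    by_cases hc : c = '.'
    · subst hc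
      rw [show List.isPrefixOf ['.'] ['.'] = true from rfl]
      simp
    · have : List.isPrefixOf ['.'] [c] = false := by
        simp [List.isPrefixOf, Ne.symm hc]
      simp only [this, Bool.false_eq_true, if_false, if_neg hc]
      rw [go_dot_append (y :: t) c t.length (by simp)]
      rw [show (y :: t).length = t.length + 1 from by simp]
      conv_rhs => rw [PySem.Chars.rfind.go.eq_def]
      have hnil2 : (y :: t).drop (t.length + 1) = [] := by
        apply List.drop_eq_nil_of_le; simp
      simp only [hnil2]
      rw [show List.isPrefixOf ['.'] ([] : List Char) = false from rfl]
      simp only [Bool.false_eq_true, if_false]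

lemma pvTdr_le (p : List Char) : pvTdr p <= p.length := by
  unfold pvTdr
  calc (p.reverse.takeWhile (fun c => List.elem c pvDigitsB)).length
      <= p.reverse.length := (List.takeWhile_prefix _).length_le
    _ = p.length := List.length_reverse

lemma pvTdr_append (p : List Char) (c : Char) :
    pvTdr (p ++ [c]) = if List.elem c pvDigitsB then pvTdr p + 1 else 0 := by
  unfold pvTdr
  rw [List.reverse_append]
  simp only [List.reverse_singleton, List.singleton_append, List.takeWhile_cons]
  by_cases hd : c ∈ pvDigitsB
  · simp [hd]
  · simp [hd]

lemma rfind_lt_length (p : List Char) (h : 0 <= PySem.Chars.rfind p ['.']) :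
    (PySem.Chars.rfind p ['.']).toNat < p.length := by
  obtain ⟨hpre, hle⟩ := rfind_spec p ['.'] h
  by_contra hc
  rw [List.drop_eq_nil_of_le (by omega)] at hpre
  have := List.prefix_nil.mp hpre
  simp at this

lemma pvB_fold (p : List Char) :
    (PySem.List.enumerate p 0).foldl pvBStep (0, none) =
    ( ((p.length - pvTdr p : Nat) : Int),
      if PySem.Chars.rfind p ['.'] = -1 then none
      else some ( (((PySem.Chars.rfind p ['.']).toNat - pvTdr (p.take (PySem.Chars.rfind p ['.']).toNat) : Nat) : Int),
                  PySem.Chars.rfind p ['.']) ) := by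
  induction p using List.reverseRecOn with
  | nil => decide
  | append_singleton q c ih =>
    rw [PySem.List.enumerate_append, List.foldl_append, ih]
    rw [PySem.List.enumerate_cons, PySem.List.enumerate_nil]
    rw [rfind_dot_append]
    simp only [List.foldl_cons, List.foldl_nil]
    by_cases hdot : c = '.'
    · subst hdot
      rw [if_pos rfl]
      unfold pvBStep
      rw [if_pos rfl]
      have h1 : pvTdr (q ++ ['.']) = 0 := by
        rw [pvTdr_append]; simp [pvDigitsB]
      have h2 : (q ++ ['.']).take ((q.length : Int)).toNat = q := by
        simp [List.take_left']
      have h3 : ¬ ((q.length : Int) = -1) := by omega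
      rw [if_neg h3]
      simp only [Prod.mk.injEq, h1, h2]
      refine ⟨by simp, by simp⟩
    · rw [if_neg hdot]
      have hmark : (if PySem.Chars.rfind q ['.'] = -1 then none
          else some ( (((PySem.Chars.rfind q ['.']).toNat - pvTdr ((q ++ [c]).take (PySem.Chars.rfind q ['.']).toNat) : Nat) : Int),
                      PySem.Chars.rfind q ['.'])) =
          (if PySem.Chars.rfind q ['.'] = -1 then none
          else some ( (((PySem.Chars.rfind q ['.']).toNat - pvTdr (q.take (PySem.Chars.rfind q ['.']).toNat) : Nat) : Int),
                      PySem.Chars.rfind q ['.'])) := by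
        by_cases hneg : PySem.Chars.rfind q ['.'] = -1
        · rw [if_pos hneg, if_pos hneg]
        · rw [if_neg hneg, if_neg hneg]
          have h0 : 0 <= PySem.Chars.rfind q ['.'] := by
            have := rfind_ge q ['.']
            omega
          have hk := rfind_lt_length q h0
          rw [List.take_append_of_le_length (by omega)]
      unfold pvBStep
      by_cases hd : List.elem c pvDigitsB = true
      · rw [if_neg (by simpa using hdot), if_neg (by rw [hd]; simp)]
        rw [pvTdr_append, if_pos hd]
        simp only [Prod.mk.injEq]
        refine ⟨?_, hmark.symm⟩
        have := pvTdr_le q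
        congr 1
        simp
      · rw [if_neg (by simpa using hdot), if_pos (by simpa using hd)]
        rw [pvTdr_append, if_neg hd]
        simp only [Prod.mk.injEq]
        refine ⟨?_, hmark.symm⟩
        simp

lemma pvAWhile_eq (l : List Char) (n : Nat) (h : n < l.length) :
    pvAWhile l n = (((l.take (n+1)).reverse.dropWhile (fun c => List.elem c pvDigitsB)).length : Int) - 1 := by
  induction n with
  | zero =>
    have ht : l.take 1 = [l[0]] := by
      rw [List.take_add_one]; simp [List.getElem?_eq_getElem h]
    unfold pvAWhile
    rw [pvDigits_agree, List.getD_eq_getElem l ' ' h, ht]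
    by_cases hd : l[0] ∈ pvDigitsB
    · simp [hd]
    · simp [hd]
  | succ m ih =>
    have ht : l.take (m+1+1) = l.take (m+1) ++ [l[m+1]] := by
      rw [List.take_add_one]; simp [List.getElem?_eq_getElem h]
    have hlen1 : (l.take (m+1)).length = m + 1 := by
      simp; omega
    unfold pvAWhile
    rw [pvDigits_agree, List.getD_eq_getElem l ' ' h]
    by_cases hd : l[m+1] ∈ pvDigitsB
    · rw [if_pos (by simpa using hd)]
      show pvAWhile l m = _
      rw [ih (by omega), ht]
      simp only [List.reverse_append, List.reverse_singleton, List.singleton_append,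
        List.dropWhile_cons]
      rw [if_pos (by simpa using hd)]
    · rw [if_neg (by simpa using hd), ht]
      simp only [List.reverse_append, List.reverse_singleton, List.singleton_append,
        List.dropWhile_cons]
      rw [if_neg (by simpa using hd)]
      simp [hlen1]

-- ===== VERDICT =====

theorem patternFromFile_spec : Claim_equal_patternFromFile := by
  unfold Claim_equal_patternFromFile Spec_patternFromFile
  intro path _
  unfold patternFromFile patternFromFile_alt
  simp only [pvB_fold]
  have hge := rfind_ge path.toList ['.']
  by_cases hneg : PySem.Chars.rfind path.toList ['.'] = -1
  · simp [hneg]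
  · have h0 : 0 <= PySem.Chars.rfind path.toList ['.'] := by omega
    have hKlen : (PySem.Chars.rfind path.toList ['.']).toNat < path.toList.length :=
      rfind_lt_length _ h0
    set K := (PySem.Chars.rfind path.toList ['.']).toNat with hK
    have hkk : PySem.Chars.rfind path.toList ['.'] = (K : Int) := by omega
    rw [hkk, if_neg (show ¬ ((K : Int) = -1) by omega)]
    by_cases hK0 : K = 0
    · simp [hK0, pvTdr]
    · rw [if_neg (show ¬ ((K : Int) < 1) by omega)]
      have hw : ((K : Int) - 1).toNat = K - 1 := by omega
      rw [hw, pvAWhile_eq path.toList (K - 1) (by omega),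
        show K - 1 + 1 = K from by omega]
      have htdr : (K - pvTdr (path.toList.take K) : Nat) =
          ((path.toList.take K).reverse.dropWhile (fun c => List.elem c pvDigitsB)).length := by
        have h1 := congrArg List.length
          (List.takeWhile_append_dropWhile (p := fun c => List.elem c pvDigitsB)
            (l := (path.toList.take K).reverse))
        simp only [List.length_append, List.length_reverse, List.length_take] at h1
        unfold pvTdr
        omega
      rw [htdr]
      have hring : (((path.toList.take K).reverse.dropWhile (fun c => List.elem c pvDigitsB)).length : Int) - 1 + 1 =
          (((path.toList.take K).reverse.dropWhile (fun c => List.elem c pvDigitsB)).length : Int) := by ring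
      rw [hring]
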